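-- pv_equiv track=rewrite | github.com/alexh-scrt/ai-talks | enhance_corpus_metadata.py | enhance_polarity
-- ===== SOURCE A (Python) =====
-- def enhance_polarity(quote_text: str, current_polarity: str) -> str:
--     """Enhanced polarity analysis with philosophical nuances"""
--
--     text_lower = quote_text.lower()
--
--     # Philosophical polarity patterns
--     if any(word in text_lower for word in ['not', 'never', 'nothing', 'none', 'neither', 'nor']):
--         return 'negative'
--     elif any(word in text_lower for word in ['must', 'should', 'ought', 'need', 'necessary']):
--         return 'prescriptive'
--     elif any(word in text_lower for word in ['can', 'may', 'possible', 'might', 'could']):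
--         return 'modal'
--     elif '?' in text_lower:
--         return 'interrogative'
--     elif any(word in text_lower for word in ['if', 'when', 'suppose', 'assume', 'imagine']):
--         return 'conditional'
--     elif any(word in text_lower for word in ['all', 'every', 'always', 'universal', 'eternal']):
--         return 'universal'
--     elif any(word in text_lower for word in ['some', 'sometimes', 'particular', 'specific']):
--         return 'particular'
--     else:
--         return current_polarity
-- ===== SOURCE B (Python) =====
-- # Text-driven scan: instead of searching the text once per keyword, walk the
-- # lowered text left to right and look every window of length 1..MAXLEN up in a
-- # keyword->priority hash table, keeping the smallest priority seen.
-- LABELS = ['negative', 'prescriptive', 'modal', 'interrogative', 'conditional',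
--           'universal', 'particular']
--
-- KEYWORD_PRIORITY = {
--     'not': 0, 'never': 0, 'nothing': 0, 'none': 0, 'neither': 0, 'nor': 0,
--     'must': 1, 'should': 1, 'ought': 1, 'need': 1, 'necessary': 1,
--     'can': 2, 'may': 2, 'possible': 2, 'might': 2, 'could': 2,
--     '?': 3,
--     'if': 4, 'when': 4, 'suppose': 4, 'assume': 4, 'imagine': 4,
--     'all': 5, 'every': 5, 'always': 5, 'universal': 5, 'eternal': 5,
--     'some': 6, 'sometimes': 6, 'particular': 6, 'specific': 6,
-- }
--
-- MAXLEN = 10  # length of the longest keyword ('particular')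
--
--
-- def enhance_polarity(quote_text: str, current_polarity: str) -> str:
--     """Single pass over the text; dictionary lookup of each window."""
--     t = quote_text.lower()
--     best = len(LABELS)
--     for j in range(len(t)):
--         for L in range(1, MAXLEN + 1):
--             p = KEYWORD_PRIORITY.get(t[j:j + L])
--             if p is not None and p < best:
--                 best = p
--     return LABELS[best] if best < len(LABELS) else current_polarity
-- ===== Notes on version B (the rewrite author's own statement) =====
-- stated objective: alternative
-- what changed: Inverted the iteration: instead of running a substring search over the text for each keyword in a 7-branch priority cascade, B lowercases once and scans the text positions a single time, looking every window of length 1..10 up in a keyword-to-priority dictionary and keeping the minimum priority seen, then maps that priority to its label.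
import Mathlib
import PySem

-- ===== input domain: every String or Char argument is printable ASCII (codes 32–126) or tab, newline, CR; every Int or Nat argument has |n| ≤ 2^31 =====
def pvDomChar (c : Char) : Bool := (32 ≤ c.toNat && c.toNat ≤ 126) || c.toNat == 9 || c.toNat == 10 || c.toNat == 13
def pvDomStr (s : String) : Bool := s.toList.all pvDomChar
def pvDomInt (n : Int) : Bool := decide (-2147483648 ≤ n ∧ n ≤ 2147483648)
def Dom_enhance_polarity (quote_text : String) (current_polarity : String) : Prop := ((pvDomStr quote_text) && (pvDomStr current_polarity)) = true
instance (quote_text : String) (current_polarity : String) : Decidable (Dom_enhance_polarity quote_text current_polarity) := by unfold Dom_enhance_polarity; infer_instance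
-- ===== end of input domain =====

-- B replaces A's per-keyword substring searches by a single left-to-right scan of the
-- lowered text that looks every window of length 1..10 up in a keyword->priority
-- dictionary and keeps the minimum priority (alternative algorithm, same result).

-- ===== PORT A =====
def enhance_polarity (quote_text : String) (current_polarity : String) : String :=
  let text_lower := PySem.Str.lower quote_text
  if ["not", "never", "nothing", "none", "neither", "nor"].any (fun w => PySem.Str.isIn w text_lower) then
    "negative"
  else if ["must", "should", "ought", "need", "necessary"].any (fun w => PySem.Str.isIn w text_lower) then
    "prescriptive"
  else if ["can", "may", "possible", "might", "could"].any (fun w => PySem.Str.isIn w text_lower) then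
    "modal"
  else if PySem.Str.isIn "?" text_lower then
    "interrogative"
  else if ["if", "when", "suppose", "assume", "imagine"].any (fun w => PySem.Str.isIn w text_lower) then
    "conditional"
  else if ["all", "every", "always", "universal", "eternal"].any (fun w => PySem.Str.isIn w text_lower) then
    "universal"
  else if ["some", "sometimes", "particular", "specific"].any (fun w => PySem.Str.isIn w text_lower) then
    "particular"
  else
    current_polarity

-- ===== PORT B =====
def pvLabels : List String :=
  ["negative", "prescriptive", "modal", "interrogative", "conditional", "universal", "particular"]

def pvKeyPrio : PySem.Dict String Nat := PySem.Dict.mk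
  [("not", 0), ("never", 0), ("nothing", 0), ("none", 0), ("neither", 0), ("nor", 0),
   ("must", 1), ("should", 1), ("ought", 1), ("need", 1), ("necessary", 1),
   ("can", 2), ("may", 2), ("possible", 2), ("might", 2), ("could", 2),
   ("?", 3),
   ("if", 4), ("when", 4), ("suppose", 4), ("assume", 4), ("imagine", 4),
   ("all", 5), ("every", 5), ("always", 5), ("universal", 5), ("eternal", 5),
   ("some", 6), ("sometimes", 6), ("particular", 6), ("specific", 6)]

-- faithful port of Source B: nested loops over positions j and window lengths L,
-- dict lookup of t[j:j+L], keep the smallest priority; LABELS[best] is the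
-- guarded in-range index, ported as List.getD.
def enhance_polarity_alt (quote_text : String) (current_polarity : String) : String :=
  let t := PySem.Str.lower quote_text
  let best := (PySem.List.pyRange 0 (PySem.Str.len t) 1).foldl (fun best j =>
      (PySem.List.pyRange 1 11 1).foldl (fun best L =>
        match pvKeyPrio.get? (PySem.Str.slice t (some j) (some (j + L))) with
        | some p => if p < best then p else best
        | none => best) best) pvLabels.length
  if best < pvLabels.length then pvLabels.getD best "" else current_polarity

-- ===== PRECONDITION & SPEC =====
def Spec_enhance_polarity (quote_text : String) (current_polarity : String) (out : String) : Prop := out = enhance_polarity_alt quote_text current_polarity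
instance (quote_text : String) (current_polarity : String) (out : String) : Decidable (Spec_enhance_polarity quote_text current_polarity out) := by unfold Spec_enhance_polarity; infer_instance

-- ===== CLAIM (what is proved, stated in full; the proofs are below) =====
def Claim_equal_enhance_polarity : Prop := ∀ (quote_text : String) (current_polarity : String), Dom_enhance_polarity quote_text current_polarity → Spec_enhance_polarity quote_text current_polarity (enhance_polarity quote_text current_polarity)

-- ===== LEMMAS AND PROOFS =====

-- min-keeping step of B's loop
def pvStep (b p : Nat) : Nat := if p < b then p else b

-- all priorities found by B's scan of t
def pvCands (t : String) : List Nat :=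
  (PySem.List.pyRange 0 (PySem.Str.len t) 1).flatMap (fun j =>
    (PySem.List.pyRange 1 11 1).filterMap (fun L =>
      pvKeyPrio.get? (PySem.Str.slice t (some j) (some (j + L)))))

-- the word list of rule i (A's lists, in A's priority order)
def pvWords : Nat → List String
  | 0 => ["not", "never", "nothing", "none", "neither", "nor"]
  | 1 => ["must", "should", "ought", "need", "necessary"]
  | 2 => ["can", "may", "possible", "might", "could"]
  | 3 => ["?"]
  | 4 => ["if", "when", "suppose", "assume", "imagine"]
  | 5 => ["all", "every", "always", "universal", "eternal"]
  | 6 => ["some", "sometimes", "particular", "specific"]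
  | _ => []

def pvM (i : Nat) (t : String) : Bool := (pvWords i).any (fun w => PySem.Str.isIn w t)

lemma pv_step_le_left (b p : Nat) : pvStep b p ≤ b := by unfold pvStep; split_ifs <;> omega

lemma pv_step_le_right (b p : Nat) : pvStep b p ≤ p := by unfold pvStep; split_ifs <;> omega

lemma pv_foldl_lookup_filterMap (g : Int → Option Nat) (xs : List Int) (b : Nat) :
    xs.foldl (fun b L => match g L with | some p => if p < b then p else b | none => b) b
      = (xs.filterMap g).foldl pvStep b := by
  induction xs generalizing b with
  | nil => rfl
  | cons x xs ih => cases hg : g x <;> simp [hg, ih, pvStep]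

lemma pv_foldl_step_le_init (xs : List Nat) (b : Nat) : xs.foldl pvStep b ≤ b := by
  induction xs generalizing b with
  | nil => simp
  | cons x xs ih => exact le_trans (ih _) (pv_step_le_left _ _)

lemma pv_foldl_step_le_mem (xs : List Nat) (b p : Nat) (hp : p ∈ xs) : xs.foldl pvStep b ≤ p := by
  induction xs generalizing b with
  | nil => simp at hp
  | cons x xs ih =>
    rw [List.foldl_cons]
    rcases List.mem_cons.1 hp with rfl | h
    · exact le_trans (pv_foldl_step_le_init _ _) (pv_step_le_right _ _)
    · exact ih _ h

lemma pv_foldl_step_mem_or (xs : List Nat) (b : Nat) : xs.foldl pvStep b = b ∨ xs.foldl pvStep b ∈ xs := by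
  induction xs generalizing b with
  | nil => simp
  | cons x xs ih =>
    rcases ih (pvStep b x) with h | h
    · rw [List.foldl_cons, h]; unfold pvStep; split_ifs <;> simp
    · simp [List.foldl_cons, h]

lemma pv_nested_eq_cands (t : String) (js : List Int) (b : Nat) :
    js.foldl (fun b j =>
      (PySem.List.pyRange 1 11 1).foldl (fun b L =>
        match pvKeyPrio.get? (PySem.Str.slice t (some j) (some (j + L))) with
        | some p => if p < b then p else b
        | none => b) b) b
    = (js.flatMap (fun j => (PySem.List.pyRange 1 11 1).filterMap (fun L =>
        pvKeyPrio.get? (PySem.Str.slice t (some j) (some (j + L)))))).foldl pvStep b := by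
  induction js generalizing b with
  | nil => rfl
  | cons x js ih =>
    rw [List.foldl_cons, List.flatMap_cons, List.foldl_append, ih,
      pv_foldl_lookup_filterMap]

lemma pv_isIn_slice (t : String) (j L : Int) (hj : 0 ≤ j) (hL : 0 ≤ L) :
    PySem.Str.isIn (PySem.Str.slice t (some j) (some (j + L))) t = true := by
  rw [PySem.Str.isIn_iff_infix]
  have hb : (0:Int) ≤ j + L := by omega
  have : (PySem.Str.slice t (some j) (some (j + L))).toList
      = (t.toList.drop j.toNat).take ((j+L).toNat - j.toNat) := by
    rw [PySem.Str.toList_slice, PySem.Chars.slice_eq_listSlice, PySem.List.slice_toNat _ hj hb]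
  rw [this]
  exact ((List.take_prefix _ _).isInfix).trans ((List.drop_suffix _ _).isInfix)

set_option maxHeartbeats 2000000 in
lemma pv_key_props (kw : String) (p : Nat) (t : String)
    (hk : pvKeyPrio.get? kw = some p) (hin : PySem.Str.isIn kw t = true) :
    p < 7 ∧ pvM p t = true := by
  have hmem := PySem.Dict.mem_items_of_get?_eq_some _ hk
  simp only [pvKeyPrio, List.mem_cons, Prod.mk.injEq, List.not_mem_nil, or_false] at hmem
  rcases hmem with ⟨rfl, rfl⟩ | ⟨rfl, rfl⟩ | ⟨rfl, rfl⟩ | ⟨rfl, rfl⟩ | ⟨rfl, rfl⟩ | ⟨rfl, rfl⟩ | ⟨rfl, rfl⟩ | ⟨rfl, rfl⟩ | ⟨rfl, rfl⟩ | ⟨rfl, rfl⟩ | ⟨rfl, rfl⟩ | ⟨rfl, rfl⟩ | ⟨rfl, rfl⟩ | ⟨rfl, rfl⟩ | ⟨rfl, rfl⟩ | ⟨rfl, rfl⟩ | ⟨rfl, rfl⟩ | ⟨rfl, rfl⟩ | ⟨rfl, rfl⟩ | ⟨rfl, rfl⟩ | ⟨rfl, rfl⟩ | ⟨rfl, rfl⟩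 | ⟨rfl, rfl⟩ | ⟨rfl, rfl⟩ | ⟨rfl, rfl⟩ | ⟨rfl, rfl⟩ | ⟨rfl, rfl⟩ | ⟨rfl, rfl⟩ | ⟨rfl, rfl⟩ | ⟨rfl, rfl⟩ | ⟨rfl, rfl⟩ <;>
    exact ⟨by omega, by simp only [PySem.Str.isIn_eq] at hin; simp only [pvM, pvWords, List.any_cons, List.any_nil, Bool.or_eq_true, PySem.Str.isIn_eq]; tauto⟩

lemma pv_mem_cands_of_key (t kw : String) (p : Nat)
    (hk : pvKeyPrio.get? kw = some p)
    (h1 : 1 ≤ kw.toList.length) (h10 : kw.toList.length ≤ 10)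
    (hin : PySem.Str.isIn kw t = true) : p ∈ pvCands t := by
  rw [PySem.Str.isIn_eq] at hin
  obtain ⟨j, hpre⟩ := (PySem.Chars.exists_prefix_drop_iff_isIn _ _).2 hin
  have hlen : kw.toList.length ≤ t.toList.length - j := by
    have := hpre.length_le; simpa using this
  have hj : j < t.toList.length := by omega
  simp only [pvCands, List.mem_flatMap, List.mem_filterMap, PySem.List.mem_pyRange_one,
    PySem.Str.len_eq]
  refine ⟨(j : Int), ⟨by positivity, by exact_mod_cast hj⟩,
    (kw.toList.length : Int), ⟨by exact_mod_cast h1, by omega⟩, ?_⟩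
  have hslice : PySem.Str.slice t (some (j:Int)) (some ((j:Int) + (kw.toList.length : Int))) = kw := by
    rw [← String.toList_inj, PySem.Str.toList_slice, PySem.Chars.slice_eq_listSlice,
      PySem.List.slice_natCast_add]
    exact (List.prefix_iff_eq_take.1 hpre).symm
  rw [hslice, hk]

lemma pv_mem_cands_iff (t : String) (p : Nat) : p ∈ pvCands t ↔ p < 7 ∧ pvM p t = true := by
  constructor
  · intro hp
    simp only [pvCands, List.mem_flatMap, List.mem_filterMap, PySem.List.mem_pyRange_one] at hp
    obtain ⟨j, ⟨hj0, _⟩, L, ⟨hL1, _⟩, hget⟩ := hp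
    exact pv_key_props _ _ _ hget (pv_isIn_slice t j L hj0 (by omega))
  · rintro ⟨hp7, hM⟩
    simp only [pvM, List.any_eq_true] at hM
    obtain ⟨w, hw, hin⟩ := hM
    interval_cases p <;> fin_cases hw <;>
      exact pv_mem_cands_of_key _ _ _ (by decide) (by decide) (by decide) hin

lemma pv_first_match (t : String) (i : Nat) (hi : i < 7) (hM : pvM i t = true)
    (hprev : ∀ j < i, pvM j t = false) : (pvCands t).foldl pvStep 7 = i := by
  have hle := pv_foldl_step_le_mem _ 7 i ((pv_mem_cands_iff t i).2 ⟨hi, hM⟩)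
  rcases pv_foldl_step_mem_or (pvCands t) 7 with h | h
  · omega
  · obtain ⟨_, hMm⟩ := (pv_mem_cands_iff t _).1 h
    by_contra hne
    have hlt : (pvCands t).foldl pvStep 7 < i := by omega
    rw [hprev _ hlt] at hMm
    exact Bool.false_ne_true hMm

lemma pv_no_match (t : String) (h : ∀ j < 7, pvM j t = false) :
    (pvCands t).foldl pvStep 7 = 7 := by
  rcases pv_foldl_step_mem_or (pvCands t) 7 with hm | hm
  · exact hm
  · obtain ⟨h7, hMm⟩ := (pv_mem_cands_iff t _).1 hm
    rw [h _ h7] at hMm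
    exact absurd hMm Bool.false_ne_true

-- ===== VERDICT (by name: the statement is the Claim_ definition above) =====
theorem enhance_polarity_spec : Claim_equal_enhance_polarity := by
  intro q cp _
  unfold Spec_enhance_polarity
  simp only [enhance_polarity, enhance_polarity_alt]
  rw [pv_nested_eq_cands]
  have e0 : (["not", "never", "nothing", "none", "neither", "nor"].any
      (fun w => PySem.Str.isIn w (PySem.Str.lower q))) = pvM 0 (PySem.Str.lower q) := rfl
  have e1 : (["must", "should", "ought", "need", "necessary"].any
      (fun w => PySem.Str.isIn w (PySem.Str.lower q))) = pvM 1 (PySem.Str.lower q) := rfl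
  have e2 : (["can", "may", "possible", "might", "could"].any
      (fun w => PySem.Str.isIn w (PySem.Str.lower q))) = pvM 2 (PySem.Str.lower q) := rfl
  have e3 : PySem.Str.isIn "?" (PySem.Str.lower q) = pvM 3 (PySem.Str.lower q) := by
    simp [pvM, pvWords]
  have e4 : (["if", "when", "suppose", "assume", "imagine"].any
      (fun w => PySem.Str.isIn w (PySem.Str.lower q))) = pvM 4 (PySem.Str.lower q) := rfl
  have e5 : (["all", "every", "always", "universal", "eternal"].any
      (fun w => PySem.Str.isIn w (PySem.Str.lower q))) = pvM 5 (PySem.Str.lower q) := rfl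
  have e6 : (["some", "sometimes", "particular", "specific"].any
      (fun w => PySem.Str.isIn w (PySem.Str.lower q))) = pvM 6 (PySem.Str.lower q) := rfl
  rw [e0, e1, e2, e3, e4, e5, e6]
  set t := PySem.Str.lower q with ht
  show (if pvM 0 t = true then "negative"
    else if pvM 1 t = true then "prescriptive"
    else if pvM 2 t = true then "modal"
    else if pvM 3 t = true then "interrogative"
    else if pvM 4 t = true then "conditional"
    else if pvM 5 t = true then "universal"
    else if pvM 6 t = true then "particular" else cp)
    = (if (pvCands t).foldl pvStep 7 < 7 then pvLabels.getD ((pvCands t).foldl pvStep 7) "" else cp)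
  by_cases h0 : pvM 0 t = true
  · rw [pv_first_match t 0 (by omega) h0 (by omega), if_pos h0]; rfl
  by_cases h1 : pvM 1 t = true
  · rw [pv_first_match t 1 (by omega) h1 (by intro j hj; interval_cases j; simp_all),
      if_neg (by simp [h0]), if_pos h1]; rfl
  by_cases h2 : pvM 2 t = true
  · rw [pv_first_match t 2 (by omega) h2
      (by intro j hj; interval_cases j <;> simp_all),
      if_neg (by simp [h0]), if_neg (by simp [h1]), if_pos h2]; rfl
  by_cases h3 : pvM 3 t = true
  · rw [pv_first_match t 3 (by omega) h3
      (by intro j hj; interval_cases j <;> simp_all),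
      if_neg (by simp [h0]), if_neg (by simp [h1]), if_neg (by simp [h2]), if_pos h3]; rfl
  by_cases h4 : pvM 4 t = true
  · rw [pv_first_match t 4 (by omega) h4
      (by intro j hj; interval_cases j <;> simp_all),
      if_neg (by simp [h0]), if_neg (by simp [h1]), if_neg (by simp [h2]),
      if_neg (by simp [h3]), if_pos h4]; rfl
  by_cases h5 : pvM 5 t = true
  · rw [pv_first_match t 5 (by omega) h5
      (by intro j hj; interval_cases j <;> simp_all),
      if_neg (by simp [h0]), if_neg (by simp [h1]), if_neg (by simp [h2]),
      if_neg (by simp [h3]), if_neg (by simp [h4]), if_pos h5]; rfl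
  by_cases h6 : pvM 6 t = true
  · rw [pv_first_match t 6 (by omega) h6
      (by intro j hj; interval_cases j <;> simp_all),
      if_neg (by simp [h0]), if_neg (by simp [h1]), if_neg (by simp [h2]),
      if_neg (by simp [h3]), if_neg (by simp [h4]), if_neg (by simp [h5]), if_pos h6]; rfl
  · rw [pv_no_match t (by intro j hj; interval_cases j <;> simp_all),
      if_neg (by simp [h0]), if_neg (by simp [h1]), if_neg (by simp [h2]),
      if_neg (by simp [h3]), if_neg (by simp [h4]), if_neg (by simp [h5]),
      if_neg (by simp [h6])]
    rfl
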